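-- pv_equiv track=rewrite | github.com/takushi-m/atcoder-work | work/agc039_a.py | count
-- ===== SOURCE A (Python) =====
-- def count(s):
--     cnt = 1
--     res = 0
--     for i in range(len(s)-1):
--         if s[i]==s[i+1]:
--             cnt += 1
--         else:
--             res += cnt//2
--             cnt = 1
--     res += cnt//2
--     return res
-- ===== SOURCE B (Python) =====
-- def count(s):
--     res = 0
--     i = 0
--     while i < len(s) - 1:
--         if s[i] == s[i + 1]:
--             res += 1
--             i += 2
--         else:
--             i += 1
--     return res
-- ===== Notes on version B (the rewrite author's own statement) =====
-- stated objective: simpler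
-- what changed: Replaces the run-length counter with floor-division per run by a greedy two-pointer walk that consumes a matched adjacent pair (advance by 2, count 1) and otherwise advances by 1, keeping no run state.
import Mathlib
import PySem

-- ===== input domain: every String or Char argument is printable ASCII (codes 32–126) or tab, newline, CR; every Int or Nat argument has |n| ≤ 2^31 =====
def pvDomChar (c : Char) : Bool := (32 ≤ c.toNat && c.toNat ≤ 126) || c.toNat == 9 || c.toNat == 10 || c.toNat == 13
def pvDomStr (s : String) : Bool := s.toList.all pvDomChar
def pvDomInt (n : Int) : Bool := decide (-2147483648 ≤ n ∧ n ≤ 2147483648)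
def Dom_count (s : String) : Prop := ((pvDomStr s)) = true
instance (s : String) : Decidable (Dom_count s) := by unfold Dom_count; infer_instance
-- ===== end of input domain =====

-- B replaces A's run-length counter (res += cnt//2 per run) by a greedy walk that
-- consumes each matched adjacent pair and advances by 2: simpler, no run state.

-- ===== PORT A =====
-- Literal port of A's loop over range(len(s)-1); indices are always in range,
-- so pyGetD's default ' ' is never returned.
def count (s : String) : Int :=
  let l := s.toList
  let p := (PySem.List.pyRange 0 ((l.length : Int) - 1) 1).foldl
    (fun (p : Int × Int) i =>
      if PySem.List.pyGetD l i ' ' == PySem.List.pyGetD l (i + 1) ' '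
      then (p.1 + 1, p.2)
      else (1, p.2 + PySem.Int.floordiv p.1 2)) (1, 0)
  p.2 + PySem.Int.floordiv p.1 2

-- ===== PORT B =====
-- Port of B's while loop: index i, advance by 2 on a matched pair, else by 1.
def countAltGo (l : List Char) (i : Nat) (res : Int) : Int :=
  if h : i + 1 < l.length then
    (if l[i] == l[i + 1] then countAltGo l (i + 2) (res + 1) else countAltGo l (i + 1) res)
  else res
termination_by l.length - i

def count_alt (s : String) : Int := countAltGo s.toList 0 0

-- ===== PRECONDITION & SPEC =====
def Spec_count (s : String) (out : Int) : Prop := out = count_alt s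
instance (s : String) (out : Int) : Decidable (Spec_count s out) := by unfold Spec_count; infer_instance

-- ===== CLAIM (what is proved, stated in full; the proofs are below) =====
def Claim_equal_count : Prop := ∀ (s : String), Dom_count s → Spec_count s (count s)

-- ===== LEMMAS AND PROOFS =====

-- Reference pairwise recursion: value of the greedy walk on a char list.
def pairCount : List Char → Int
  | a :: b :: t => if a == b then 1 + pairCount t else pairCount (b :: t)
  | _ => 0

theorem countAltGo_eq (l : List Char) (i : Nat) (res : Int) :
    countAltGo l i res = res + pairCount (l.drop i) := by
  induction i, res using countAltGo.induct l with
  | case1 i res h he ih =>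
    rw [countAltGo, dif_pos h, if_pos he, ih]
    rw [List.drop_eq_getElem_cons (show i < l.length by omega),
        List.drop_eq_getElem_cons (show i + 1 < l.length from h)]
    show _ = res + pairCount (l[i] :: l[i+1] :: l.drop (i+2))
    rw [pairCount, if_pos he]; ring
  | case2 i res h he ih =>
    rw [countAltGo, dif_pos h, if_neg he, ih]
    rw [List.drop_eq_getElem_cons (show i < l.length by omega),
        List.drop_eq_getElem_cons (show i + 1 < l.length from h)]
    show res + pairCount (l[i+1] :: l.drop (i+2)) = res + pairCount (l[i] :: l[i+1] :: l.drop (i+2))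
    rw [pairCount, if_neg he]
  | case3 i res h =>
    rw [countAltGo, dif_neg h]
    rcases Nat.lt_or_ge l.length (i+1) with h2 | h2
    · rw [List.drop_eq_nil_of_le (by omega : l.length ≤ i)]
      simp [pairCount]
    · have hi : i < l.length := by omega
      rw [List.drop_eq_getElem_cons hi, List.drop_eq_nil_of_le (by omega : l.length ≤ i + 1)]
      simp [pairCount]

theorem pairCount_replicate (n : Nat) (c : Char) :
    pairCount (List.replicate n c) = ((n / 2 : Nat) : Int) := by
  induction n using Nat.strong_induction_on with
  | _ n ih =>
    match n with
    | 0 => simp [pairCount]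
    | 1 => simp [pairCount, List.replicate]
    | Nat.succ (Nat.succ m) =>
      show pairCount (c :: c :: List.replicate m c) = _
      simp only [pairCount, beq_self_eq_true, if_pos, ih m (by omega)]
      have : (m + 2) / 2 = m / 2 + 1 := by omega
      rw [this]; push_cast; ring

theorem pairCount_replicate_append (n : Nat) (c d : Char) (t : List Char) (h : ¬ (c == d) = true) :
    pairCount (List.replicate n c ++ d :: t) = ((n / 2 : Nat) : Int) + pairCount (d :: t) := by
  induction n using Nat.strong_induction_on with
  | _ n ih =>
    match n with
    | 0 => simp
    | 1 => simp [pairCount, List.replicate, h]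
    | Nat.succ (Nat.succ m) =>
      show pairCount (c :: c :: (List.replicate m c ++ d :: t)) = _
      simp only [pairCount, beq_self_eq_true, if_pos, ih m (by omega)]
      have : (m + 2) / 2 = m / 2 + 1 := by omega
      rw [this]; push_cast; ring

theorem floordiv_two_nat (k : Nat) :
    PySem.Int.floordiv (k : Int) 2 = ((k / 2 : Nat) : Int) := by
  exact_mod_cast PySem.Int.floordiv_natCast k 2

-- A's loop step, as a function of the current pair of adjacent characters.
def stepA (p : Int × Int) (ab : Char × Char) : Int × Int :=
  if ab.1 == ab.2 then (p.1 + 1, p.2) else (1, p.2 + PySem.Int.floordiv p.1 2)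

-- Invariant of A's run-length loop, related to the greedy walk's value.
theorem foldl_stepA_eq (t : List Char) : ∀ (c : Char) (k : Nat) (res : Int),
    (((c :: t).zip t).foldl stepA ((k : Int), res)).2
      + PySem.Int.floordiv (((c :: t).zip t).foldl stepA ((k : Int), res)).1 2
    = res + pairCount (List.replicate k c ++ t) := by
  induction t with
  | nil =>
    intro c k res
    simp only [List.zip_nil_right, List.foldl_nil, List.append_nil, pairCount_replicate]
    rw [floordiv_two_nat]
  | cons d t ih =>
    intro c k res
    have hz : (c :: d :: t).zip (d :: t) = (c, d) :: ((d :: t).zip t) := rfl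
    rw [hz, List.foldl_cons]
    by_cases he : (c == d) = true
    · have hc : c = d := by simpa using he
      simp only [stepA, he, if_pos]
      have : ((k : Int) + 1) = ((k + 1 : Nat) : Int) := by push_cast; ring
      rw [this, ih d (k+1) res]
      subst hc
      rw [show List.replicate (k+1) c = List.replicate k c ++ [c] from List.replicate_succ' ..]
      simp
    · simp only [stepA, he, if_neg, Bool.not_eq_true]
      rw [show (1 : Int) = ((1 : Nat) : Int) from rfl, ih d 1 (res + PySem.Int.floordiv (k:Int) 2)]
      rw [pairCount_replicate_append k c d t he, floordiv_two_nat]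
      simp only [List.replicate_one, List.singleton_append]
      ring

-- Convert A's index loop into the fold over adjacent pairs.
theorem count_eq_pairs (s : String) :
    count s = (((s.toList).zip (s.toList.drop 1)).foldl stepA (1, 0)).2
      + PySem.Int.floordiv (((s.toList).zip (s.toList.drop 1)).foldl stepA (1, 0)).1 2 := by
  unfold count
  cases hl : s.toList with
  | nil => simp [PySem.List.pyRange_one_eq_nil]
  | cons a t =>
    have hlen : ((a :: t).length : Int) - 1 = (((a :: t).zip t).length : Int) := by
      simp [List.length_zip]
    simp only [hl]
    rw [hlen]
    have hcongr :
        (PySem.List.pyRange 0 (((a :: t).zip t).length : Int) 1).foldl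
          (fun (p : Int × Int) i =>
            if PySem.List.pyGetD (a :: t) i ' ' == PySem.List.pyGetD (a :: t) (i + 1) ' '
            then (p.1 + 1, p.2)
            else (1, p.2 + PySem.Int.floordiv p.1 2)) (1, 0)
        = (PySem.List.pyRange 0 (((a :: t).zip t).length : Int) 1).foldl
          (fun (p : Int × Int) j => stepA p (PySem.List.pyGetD ((a :: t).zip t) j (' ', ' '))) (1, 0) := by
      apply PySem.List.foldl_congr_mem
      intro acc x hx
      rw [PySem.List.mem_pyRange_one] at hx
      obtain ⟨hx0, hx1⟩ := hx
      have hz : ((a :: t).zip t).length = t.length := by simp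
      rw [hz] at hx1
      have hxlt : x.toNat < ((a :: t).zip t).length := by omega
      have hxl1 : x.toNat < (a :: t).length := by simp only [List.length_cons]; omega
      have hxl2 : x.toNat + 1 < (a :: t).length := by simp only [List.length_cons]; omega
      rw [PySem.List.pyGetD_eq_getElem _ _ hx0 (by omega)]
      rw [show x + 1 = ((x.toNat + 1 : Nat) : Int) by omega]
      rw [PySem.List.pyGetD_eq_getElem _ _ (by omega) (by exact_mod_cast hxl2)]
      rw [PySem.List.pyGetD_eq_getElem _ _ hx0 (by omega)]
      simp only [Int.toNat_natCast, List.getElem_zip, stepA]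
      rfl
    rw [hcongr]
    rw [PySem.List.foldl_pyRange_zero_pyGetD' ((a :: t).zip t) (' ', ' ') stepA (1, 0)]
    rfl

-- ===== VERDICT (by name: the statement is the Claim_ definition above) =====
theorem count_spec : Claim_equal_count := by
  intro s _
  show count s = count_alt s
  rw [count_eq_pairs]
  unfold count_alt
  rw [countAltGo_eq]
  cases hl : s.toList with
  | nil => simp [pairCount]
  | cons a t =>
    have := foldl_stepA_eq t a 1 0
    simp only [List.replicate_one, List.singleton_append] at this
    simpa [List.drop] using this
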